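-- pv_equiv track=rewrite | github.com/alivay/finding_the_wumpus | main.py | get_non_operator
-- ===== SOURCE A (Python) =====
-- def get_non_operator(sentence):
--     i=0;
--     private_sentence = sentence
--     while len(private_sentence)!=0 and not((private_sentence[0] == '(') or (private_sentence[0] == ')') or (private_sentence[0] == '&')
--                                            or (private_sentence[0] == '|') or (private_sentence[0] == '>')):
--         i+=1
--         private_sentence = private_sentence[1:]
--     return sentence[0:i]
-- ===== SOURCE B (Python) =====
-- def get_non_operator(sentence):
--     positions = [p for p in (sentence.find(op) for op in "()&|>") if p != -1]
--     cut = min(positions) if positions else len(sentence)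
--     return sentence[:cut]
-- ===== Notes on version B (the rewrite author's own statement) =====
-- stated objective: faster
-- what changed: Replaces the early-exit left-to-right character scan (which re-slices the remaining string each step) with a table of per-operator first-occurrence indices via str.find reduced by min, then one slice.
import Mathlib
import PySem

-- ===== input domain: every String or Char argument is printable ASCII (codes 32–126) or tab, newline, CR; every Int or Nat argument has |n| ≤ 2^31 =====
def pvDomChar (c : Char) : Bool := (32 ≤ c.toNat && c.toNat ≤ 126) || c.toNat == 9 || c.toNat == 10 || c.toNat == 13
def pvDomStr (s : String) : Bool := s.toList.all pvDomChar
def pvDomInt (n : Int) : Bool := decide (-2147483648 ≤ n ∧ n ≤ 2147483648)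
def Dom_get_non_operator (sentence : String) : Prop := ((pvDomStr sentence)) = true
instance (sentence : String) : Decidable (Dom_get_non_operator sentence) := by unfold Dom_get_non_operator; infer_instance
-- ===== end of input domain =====

-- B replaces A's early-exit left-to-right scan (which re-slices the remaining string each step)
-- by per-operator first-occurrence indices via str.find reduced by min — a more idiomatic shape.

-- ===== PORT A =====
-- A's while loop: advance i and drop the head of private_sentence while the head is not an operator.
def getNonOperatorLoop (privateSentence : List Char) (i : Int) : Int :=
  match privateSentence with
  | [] => i
  | c :: rest =>
    if c == '(' || c == ')' || c == '&' || c == '|' || c == '>' then i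
    else getNonOperatorLoop rest (i + 1)

def get_non_operator (sentence : String) : String :=
  let i := getNonOperatorLoop sentence.toList 0
  PySem.Str.slice sentence (some 0) (some i)

-- ===== PORT B =====
def get_non_operator_alt (sentence : String) : String :=
  let positions :=
    (['(', ')', '&', '|', '>'].map (fun op => PySem.Chars.find sentence.toList [op])).filter
      (fun p => p ≠ -1)
  let cut : Int :=
    match PySem.List.min? positions id with
    | some m => m
    | none => PySem.Str.len sentence
  PySem.Str.slice sentence none (some cut)

-- ===== PRECONDITION & SPEC =====
def Spec_get_non_operator (sentence : String) (out : String) : Prop := out = get_non_operator_alt sentence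
instance (sentence : String) (out : String) : Decidable (Spec_get_non_operator sentence out) := by unfold Spec_get_non_operator; infer_instance

-- ===== CLAIM (what is proved, stated in full; the proofs are below) =====
def Claim_equal_get_non_operator : Prop := ∀ (sentence : String), Dom_get_non_operator sentence → Spec_get_non_operator sentence (get_non_operator sentence)

-- ===== LEMMAS AND PROOFS =====

-- is c one of the five operator characters?
def pvIsOp (c : Char) : Bool := c == '(' || c == ')' || c == '&' || c == '|' || c == '>'

-- index of the first operator character (length if none)
def pvCut : List Char → Nat
  | [] => 0
  | c :: r => if pvIsOp c then 0 else pvCut r + 1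

-- index of the first occurrence of c (length if absent)
def pvFirst (c : Char) : List Char → Nat
  | [] => 0
  | x :: r => if x == c then 0 else pvFirst c r + 1

theorem pvLoop_eq (cs : List Char) (i : Int) :
    getNonOperatorLoop cs i = i + (pvCut cs : Int) := by
  induction cs generalizing i with
  | nil => simp [getNonOperatorLoop, pvCut]
  | cons c r ih =>
    simp only [getNonOperatorLoop, pvCut, pvIsOp]
    split <;> simp [ih] <;> omega

theorem pvCut_lt_spec (cs : List Char) (h : pvCut cs < cs.length) :
    ∃ x, cs[pvCut cs]? = some x ∧ pvIsOp x = true := by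
  induction cs with
  | nil => simp [pvCut] at h
  | cons c r ih =>
    by_cases hc : pvIsOp c = true
    · exact ⟨c, by simp [pvCut, hc], hc⟩
    · simp only [pvCut, hc, if_false, if_neg] at h ⊢
      obtain ⟨x, hx, hop⟩ := ih (by simpa using h)
      exact ⟨x, by simpa using hx, hop⟩

theorem pvCut_min (cs : List Char) (i : Nat) (x : Char)
    (hx : cs[i]? = some x) (hop : pvIsOp x = true) : pvCut cs ≤ i := by
  induction cs generalizing i with
  | nil => simp at hx
  | cons c r ih =>
    cases i with
    | zero =>
      simp at hx; subst hx
      simp [pvCut, hop]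
    | succ j =>
      simp only [pvCut]
      split
      · omega
      · have := ih j (by simpa using hx)
        omega

theorem pvCut_eq_len (cs : List Char) (h : ∀ x ∈ cs, pvIsOp x = false) :
    pvCut cs = cs.length := by
  induction cs with
  | nil => simp [pvCut]
  | cons c r ih =>
    have hc := h c (by simp)
    simp only [pvCut, hc]
    simp [ih (fun x hx => h x (by simp [hx]))]

theorem pvFirst_get (c : Char) (cs : List Char) (h : c ∈ cs) :
    cs[pvFirst c cs]? = some c := by
  induction cs with
  | nil => simp at h
  | cons x r ih =>
    by_cases hx : x = c
    · subst hx; simp [pvFirst]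
    · have hxc : (x == c) = false := by simp [hx]
      have hm : c ∈ r := by
        rcases List.mem_cons.mp h with h' | h'
        · exact absurd h'.symm hx
        · exact h'
      simp only [pvFirst, hxc, Bool.false_eq_true, if_false]
      simpa using ih hm

theorem pvFirst_min (c : Char) (cs : List Char) (i : Nat) (hx : cs[i]? = some c) :
    pvFirst c cs ≤ i := by
  induction cs generalizing i with
  | nil => simp at hx
  | cons x r ih =>
    cases i with
    | zero =>
      simp at hx; subst hx
      simp [pvFirst]
    | succ j =>
      simp only [pvFirst]
      split
      · omega
      · have := ih j (by simpa using hx)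
        omega

theorem pvFirst_lt (c : Char) (cs : List Char) (h : c ∈ cs) :
    pvFirst c cs < cs.length := by
  have := pvFirst_get c cs h
  exact List.getElem?_eq_some_iff.mp this |>.1

-- single-character prefix of a drop ↔ getElem?
theorem pvPrefix_drop (c : Char) (cs : List Char) (i : Nat) :
    [c] <+: cs.drop i ↔ cs[i]? = some c := by
  rw [← List.head?_drop]
  constructor
  · rintro ⟨t, ht⟩
    rw [← ht]; simp
  · intro h
    cases hd : cs.drop i with
    | nil => simp [hd] at h
    | cons y t =>
      simp [hd] at h
      exact ⟨t, by simp [hd, h]⟩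

theorem pvFind_not_mem (s : List Char) (c : Char) (h : c ∉ s) :
    PySem.Chars.find s [c] = -1 := by
  rw [PySem.Chars.find_eq_neg_one_iff]
  intro hinf
  exact h (hinf.sublist.mem (by simp))

theorem pvFind_mem (s : List Char) (c : Char) (h : c ∈ s) :
    PySem.Chars.find s [c] = (pvFirst c s : Int) := by
  have hne : PySem.Chars.find s [c] ≠ -1 := by
    rw [Ne, PySem.Chars.find_eq_neg_one_iff, not_not]
    obtain ⟨a, b, rfl⟩ := List.append_of_mem h
    exact ⟨a, b, by simp⟩
  have hzero : PySem.Chars.findFrom s [c] ((0 : Nat) : Int) = PySem.Chars.find s [c] := by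
    simpa using PySem.Chars.findFrom_zero s [c]
  have hspec := PySem.Chars.findFrom_natCast_spec s [c] 0 (Nat.zero_le _) (by rw [hzero]; exact hne)
  rw [hzero] at hspec
  obtain ⟨hnn, hpre, hmin⟩ := hspec
  have hnn' : 0 ≤ PySem.Chars.find s [c] := by exact_mod_cast hnn
  set j := (PySem.Chars.find s [c]).toNat with hj
  have hget : s[j]? = some c := (pvPrefix_drop c s j).mp hpre
  have h1 : pvFirst c s ≤ j := pvFirst_min c s j hget
  have h2 : ¬ pvFirst c s < j := by
    intro hlt
    exact hmin (pvFirst c s) (Nat.zero_le _) hlt ((pvPrefix_drop c s _).mpr (pvFirst_get c s h))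
  have hjeq : j = pvFirst c s := by omega
  omega

theorem pvMin?_cons_ne_none (x : Int) (t : List Int) :
    PySem.List.min? (x :: t) id ≠ none := by
  induction t generalizing x with
  | nil => simp [PySem.List.min?]
  | cons y r ih =>
    have h : PySem.List.min? (x :: y :: r) id
        = PySem.List.min? ((if y < x then y else x) :: r) id := by
      simp only [PySem.List.min?, List.foldl, id]
      split <;> rfl
    rw [h]
    exact ih _

theorem pvIsOp_mem (c : Char) (h : pvIsOp c = true) : c ∈ ['(', ')', '&', '|', '>'] := by
  simp only [pvIsOp, Bool.or_eq_true, beq_iff_eq] at h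
  simp only [List.mem_cons, List.mem_singleton]
  tauto

theorem pvMain (s : String) : get_non_operator s = get_non_operator_alt s := by
  rw [← String.toList_inj]
  set cs := s.toList with hcs
  set ops : List Char := ['(', ')', '&', '|', '>'] with hops
  have hloop : getNonOperatorLoop cs 0 = ((pvCut cs : Nat) : Int) := by
    simpa using pvLoop_eq cs 0
  set positions := (ops.map (fun op => PySem.Chars.find cs [op])).filter (fun p => p ≠ -1)
    with hpos
  have hA : (get_non_operator s).toList = cs.take (pvCut cs) := by
    simp only [get_non_operator, hloop, PySem.Str.toList_slice,
      PySem.Chars.slice_eq_listSlice, ← hcs]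
    rw [PySem.List.slice_zero_start, PySem.List.slice_to_natCast]
  rw [hA]
  simp only [get_non_operator_alt, PySem.Str.toList_slice, PySem.Chars.slice_eq_listSlice, ← hcs,
    ← hops, ← hpos]
  cases hm : PySem.List.min? positions id with
  | none =>
    -- no operator occurs: every find is -1, cut = len
    have hempty : positions = [] := by
      cases hp : positions with
      | nil => rfl
      | cons x t => exact absurd hm (by rw [hp]; exact pvMin?_cons_ne_none x t)
    have hnone : ∀ x ∈ cs, pvIsOp x = false := by
      intro x hx
      by_contra hop
      have hop' : pvIsOp x = true := by
        cases hxx : pvIsOp x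
        · exact absurd hxx hop
        · rfl
      have hmemops : x ∈ ops := pvIsOp_mem x hop'
      have hfind : PySem.Chars.find cs [x] ∈ positions := by
        rw [hpos]
        refine List.mem_filter.mpr ⟨List.mem_map.mpr ⟨x, hmemops, rfl⟩, ?_⟩
        simp only [decide_eq_true_eq, ne_eq]
        rw [pvFind_mem cs x hx]
        omega
      rw [hempty] at hfind
      simp at hfind
    have hcut : pvCut cs = cs.length := pvCut_eq_len cs hnone
    rw [PySem.Str.len_eq, ← hcs, PySem.List.slice_to_natCast, hcut]
  | some m =>
    -- m is the least first-occurrence index among operators present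
    have hmem := PySem.List.min?_mem hm
    have hmin := PySem.List.min?_isMin hm
    rw [hpos] at hmem
    obtain ⟨hmap, hne⟩ := List.mem_filter.mp hmem
    obtain ⟨c0, hc0ops, hc0find⟩ := List.mem_map.mp hmap
    have hc0mem : c0 ∈ cs := by
      by_contra habs
      rw [← hc0find, pvFind_not_mem cs c0 habs] at hne
      simp at hne
    have hmval : m = (pvFirst c0 cs : Int) := by
      rw [← hc0find, pvFind_mem cs c0 hc0mem]
    have hc0op : pvIsOp c0 = true := by
      rw [hops] at hc0ops
      fin_cases hc0ops <;> decide
    -- pvCut cs ≤ pvFirst c0 cs : s[pvFirst c0] is an operator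
    have hle1 : pvCut cs ≤ pvFirst c0 cs :=
      pvCut_min cs _ c0 (pvFirst_get c0 cs hc0mem) hc0op
    -- pvFirst c0 cs ≥ ... reverse: pvCut not strictly less
    have hle2 : pvFirst c0 cs ≤ pvCut cs := by
      by_contra hlt
      push_neg at hlt
      have hcutlt : pvCut cs < cs.length :=
        lt_of_lt_of_le hlt (le_of_lt (pvFirst_lt c0 cs hc0mem))
      obtain ⟨x, hx, hxop⟩ := pvCut_lt_spec cs hcutlt
      have hxmem : x ∈ cs := List.mem_of_getElem? hx
      have hxops : x ∈ ops := by rw [hops]; exact pvIsOp_mem x hxop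
      have hxfind : PySem.Chars.find cs [x] ∈ positions := by
        rw [hpos]
        refine List.mem_filter.mpr ⟨List.mem_map.mpr ⟨x, hxops, rfl⟩, ?_⟩
        simp only [decide_eq_true_eq, ne_eq]
        rw [pvFind_mem cs x hxmem]
        omega
      have hmle := hmin _ hxfind
      simp only [id] at hmle
      rw [pvFind_mem cs x hxmem, hmval] at hmle
      have hxle : pvFirst x cs ≤ pvCut cs := pvFirst_min x cs _ hx
      have : pvFirst c0 cs ≤ pvFirst x cs := by exact_mod_cast hmle
      omega
    have hfin : m = (pvCut cs : Int) := by
      rw [hmval]; exact_mod_cast (by omega : pvFirst c0 cs = pvCut cs)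
    rw [hfin, PySem.List.slice_to_natCast]

-- ===== VERDICT (by name: the statement is the Claim_ definition above) =====
theorem get_non_operator_spec : Claim_equal_get_non_operator := by
  intro sentence _
  unfold Spec_get_non_operator
  exact pvMain sentence
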